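-- pv_equiv track=rewrite | github.com/mahan2079/TaskTitan | TaskTitan/app/controllers/search_manager.py | highlight_match
-- ===== SOURCE A (Python) =====
-- def highlight_match(text: str, query: str) -> str:
--     """
--     Highlight matching text in search results.
--
--     Args:
--         text: Text to highlight
--         query: Search query
--
--     Returns:
--         HTML-formatted string with highlighted matches
--     """
--     if not query or not text:
--         return text
--
--     query_lower = query.lower()
--     text_lower = text.lower()
--
--     if query_lower not in text_lower:
--         return text
--
--     # Find all occurrences (case-insensitive)
--     start_idx = 0
--     highlighted = []
--     query_len = len(query)
--
--     while True:
--         idx = text_lower.find(query_lower, start_idx)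
--         if idx == -1:
--             break
--
--         # Add text before match
--         highlighted.append(text[start_idx:idx])
--
--         # Add highlighted match
--         highlighted.append(f"<b>{text[idx:idx+query_len]}</b>")
--
--         start_idx = idx + query_len
--
--     # Add remaining text
--     highlighted.append(text[start_idx:])
--
--     return "".join(highlighted)
-- ===== SOURCE B (Python) =====
-- import re
--
--
-- def highlight_match(text: str, query: str) -> str:
--     if not query or not text:
--         return text
--     return re.sub(re.escape(query), lambda m: f"<b>{m.group(0)}</b>",
--                   text, flags=re.IGNORECASE)
-- ===== Notes on version B (the rewrite author's own statement) =====
-- stated objective: idiomatic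
-- what changed: Replaced the manual while/str.find index loop with slice accumulation and ''.join by a single re.sub call with an escaped literal pattern, re.IGNORECASE, and a callback wrapping each match in <b>...</b>.
import Mathlib
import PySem

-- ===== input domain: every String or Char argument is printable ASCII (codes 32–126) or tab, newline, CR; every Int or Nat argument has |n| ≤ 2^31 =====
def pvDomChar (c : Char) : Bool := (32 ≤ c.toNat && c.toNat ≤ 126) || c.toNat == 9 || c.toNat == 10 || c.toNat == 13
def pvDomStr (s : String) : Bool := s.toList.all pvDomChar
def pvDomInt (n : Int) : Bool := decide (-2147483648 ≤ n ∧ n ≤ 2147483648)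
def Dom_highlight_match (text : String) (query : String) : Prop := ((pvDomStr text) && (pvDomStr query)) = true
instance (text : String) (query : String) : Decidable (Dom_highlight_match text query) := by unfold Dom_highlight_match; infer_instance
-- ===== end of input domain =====

-- B replaces A's manual while/str.find index loop by a single re.sub call with an
-- escaped literal pattern and re.IGNORECASE (objective: idiomatic).

-- ===== PORT A =====
-- The while-True loop of A: start_idx / highlighted accumulator; fuel bounds the
-- iteration count (each iteration advances start_idx by at least 1 when query ≠ "").
def hmLoopA (fuel : Nat) (text tl ql : List Char) (qlen : Nat) (start : Nat)
    (acc : List (List Char)) : List (List Char) :=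
  match fuel with
  | 0 => acc
  | f + 1 =>
    let idx := PySem.Chars.findFrom tl ql (start : Int) none
    if idx = -1 then
      -- break, then highlighted.append(text[start_idx:])
      acc ++ [PySem.List.slice text (some (start : Int)) none]
    else
      hmLoopA f text tl ql qlen (idx + qlen).toNat
        (acc ++ [PySem.List.slice text (some (start : Int)) (some idx),
                 ['<','b','>'] ++ PySem.List.slice text (some idx) (some (idx + qlen)) ++ ['<','/','b','>']])

def highlight_match (text : String) (query : String) : String :=
  let t := text.toList
  let q := query.toList
  if q = [] ∨ t = [] then text
  else
    let ql := PySem.Chars.lower q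
    let tl := PySem.Chars.lower t
    if PySem.Chars.isIn ql tl = false then text
    else
      -- "".join(highlighted) = flatten of the accumulated pieces
      String.ofList (hmLoopA (t.length + 1) t tl ql q.length 0 []).flatten

-- ===== PORT B =====
-- Hand port of re.sub(re.escape(query), lambda m: "<b>"+m.group(0)+"</b>", text,
-- flags=re.IGNORECASE) for a NON-EMPTY pattern: the regex engine's left-to-right
-- non-overlapping scan over a literal pattern is exactly this recursion; on the
-- ASCII domain re.IGNORECASE is comparison of lowercased characters.
def hmScanB (ql : List Char) : List Char → List Char
  | [] => []
  | c :: cs =>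
    if PySem.Chars.lower ((c :: cs).take ql.length) = ql then
      ['<','b','>'] ++ (c :: cs).take ql.length ++ ['<','/','b','>']
        ++ hmScanB ql (cs.drop (ql.length - 1))
    else
      c :: hmScanB ql cs
  termination_by rest => rest.length
  decreasing_by
  all_goals simp [List.length_drop]

def highlight_match_alt (text : String) (query : String) : String :=
  let t := text.toList
  let q := query.toList
  if q = [] ∨ t = [] then text
  else String.ofList (hmScanB (PySem.Chars.lower q) t)

-- ===== PRECONDITION & SPEC =====
def Spec_highlight_match (text : String) (query : String) (out : String) : Prop := out = highlight_match_alt text query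
instance (text : String) (query : String) (out : String) : Decidable (Spec_highlight_match text query out) := by unfold Spec_highlight_match; infer_instance

-- ===== CLAIM (what is proved, stated in full; the proofs are below) =====
def Claim_equal_highlight_match : Prop := ∀ (text : String) (query : String), Dom_highlight_match text query → Spec_highlight_match text query (highlight_match text query)

-- ===== LEMMAS AND PROOFS =====
lemma hmScanB_test_iff (ql rest : List Char) :
    PySem.Chars.lower (rest.take ql.length) = ql ↔ ql <+: PySem.Chars.lower rest := by
  have h : PySem.Chars.lower (rest.take ql.length) = (PySem.Chars.lower rest).take ql.length := by
    simp [PySem.Chars.lower]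
  rw [h, List.prefix_iff_eq_take]
  exact eq_comm

lemma hmScanB_cons (ql : List Char) (c : Char) (cs : List Char) :
    hmScanB ql (c :: cs) =
      if PySem.Chars.lower ((c :: cs).take ql.length) = ql then
        ['<','b','>'] ++ (c :: cs).take ql.length ++ ['<','/','b','>']
          ++ hmScanB ql (cs.drop (ql.length - 1))
      else c :: hmScanB ql cs := by
  rw [hmScanB.eq_def]

lemma hmScanB_no_match (ql : List Char) : ∀ (rest : List Char),
    ¬ ql <:+: PySem.Chars.lower rest → hmScanB ql rest = rest := by
  intro rest
  fun_induction hmScanB ql rest with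
  | case1 => intro _; rfl
  | case2 c cs htest ih =>
    intro h
    exact absurd (((hmScanB_test_iff ql (c :: cs)).mp htest).isInfix) h
  | case3 c cs htest ih =>
    intro h
    rw [ih]
    intro h2
    apply h
    have h3 : ql <:+: PySem.Chars.lowerChar c :: PySem.Chars.lower cs :=
      List.infix_cons h2
    simpa [PySem.Chars.lower] using h3

lemma lower_drop (t : List Char) (n : Nat) :
    PySem.Chars.lower (t.drop n) = (PySem.Chars.lower t).drop n := by
  simp [PySem.Chars.lower]

lemma lower_length (t : List Char) : (PySem.Chars.lower t).length = t.length := by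
  simp [PySem.Chars.lower]

lemma hmScanB_match (ql rest : List Char) (hq : ql ≠ [])
    (h : ql <+: PySem.Chars.lower rest) :
    hmScanB ql rest = ['<','b','>'] ++ rest.take ql.length ++ ['<','/','b','>']
      ++ hmScanB ql (rest.drop ql.length) := by
  cases rest with
  | nil =>
    exfalso
    have h' : ql <+: ([] : List Char) := by simpa [PySem.Chars.lower] using h
    exact hq (List.prefix_nil.mp h')
  | cons c cs =>
    rw [hmScanB_cons, if_pos ((hmScanB_test_iff ql (c :: cs)).mpr h)]
    have hlen : 0 < ql.length := List.length_pos_iff.mpr hq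
    have : (c :: cs).drop ql.length = cs.drop (ql.length - 1) := by
      rcases Nat.exists_eq_add_of_lt hlen with ⟨n, hn⟩
      rw [hn]
      simp
    rw [this]

lemma hmScanB_step (ql : List Char) (c : Char) (cs : List Char)
    (h : ¬ ql <+: PySem.Chars.lower (c :: cs)) :
    hmScanB ql (c :: cs) = c :: hmScanB ql cs := by
  rw [hmScanB_cons, if_neg (fun ht => h ((hmScanB_test_iff ql (c :: cs)).mp ht))]

lemma hmScanB_skip (t ql : List Char) (hq : ql ≠ []) :
    ∀ (d start j : Nat), start ≤ j → j - start = d →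
      ql <+: (PySem.Chars.lower t).drop j →
      (∀ i, start ≤ i → i < j → ¬ ql <+: (PySem.Chars.lower t).drop i) →
      hmScanB ql (t.drop start)
        = (t.drop start).take (j - start) ++ ['<','b','>']
          ++ (t.drop j).take ql.length ++ ['<','/','b','>']
          ++ hmScanB ql (t.drop (j + ql.length)) := by
  intro d
  induction d with
  | zero =>
    intro start j hsj hd hmatch _
    have hj : start = j := by omega
    subst hj
    rw [hmScanB_match ql (t.drop start) hq (by rw [lower_drop]; exact hmatch)]
    simp [List.drop_drop]
  | succ d ih =>
    intro start j hsj hd hmatch hmin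
    have hlen : 0 < ql.length := List.length_pos_iff.mpr hq
    have hjlen : j < t.length := by
      have := hmatch.length_le
      simp [lower_length] at this
      omega
    have hst : start < t.length := by omega
    rw [List.drop_eq_getElem_cons hst]
    rw [hmScanB_step ql _ _ (by
      rw [← List.drop_eq_getElem_cons hst, lower_drop]
      exact hmin start le_rfl (by omega))]
    have hrec := ih (start + 1) j (by omega) (by omega) hmatch
      (fun i h1 h2 => hmin i (by omega) h2)
    rw [hrec]
    have h2 : j - start = (j - (start + 1)) + 1 := by omega
    rw [h2, List.take_succ_cons]
    simp

lemma hmLoopA_eq (t ql : List Char) (hq : ql ≠ []) :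
    ∀ (fuel start : Nat) (acc : List (List Char)),
      t.length - start < fuel → start ≤ t.length →
      (hmLoopA fuel t (PySem.Chars.lower t) ql ql.length start acc).flatten
        = acc.flatten ++ hmScanB ql (t.drop start) := by
  intro fuel
  induction fuel with
  | zero => intro start acc h _; omega
  | succ f ih =>
    intro start acc hfuel hstart
    have htl : start ≤ (PySem.Chars.lower t).length := by rw [lower_length]; exact hstart
    rw [hmLoopA]
    by_cases hidx : PySem.Chars.findFrom (PySem.Chars.lower t) ql (start : Int) none = -1
    · rw [if_pos hidx]
      have hno : ¬ ql <:+: (PySem.Chars.lower t).drop start :=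
        (PySem.Chars.findFrom_natCast_eq_neg_one_iff _ ql start htl).mp hidx
      rw [hmScanB_no_match ql (t.drop start) (by rw [lower_drop]; exact hno)]
      simp [PySem.List.slice_from_natCast]
    · rw [if_neg hidx]
      obtain ⟨hge, hpre, hmin⟩ :=
        PySem.Chars.findFrom_natCast_spec _ ql start htl hidx
      set idx := PySem.Chars.findFrom (PySem.Chars.lower t) ql (start : Int) none with hidxdef
      have hidx0 : 0 ≤ idx := le_trans (by exact_mod_cast Int.natCast_nonneg start) hge
      set j := idx.toNat with hjdef
      have hjcast : idx = (j : Int) := (Int.toNat_of_nonneg hidx0).symm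
      have hsj : start ≤ j := by omega
      have hlen : 0 < ql.length := List.length_pos_iff.mpr hq
      have hjq : j + ql.length ≤ t.length := by
        have := hpre.length_le
        simp [lower_length] at this
        omega
      have hstep : (((j : Int)) + (ql.length : Int)).toNat = j + ql.length := by omega
      have hrec := ih (j + ql.length) (acc ++
        [PySem.List.slice t (some (start : Int)) (some idx),
         ['<','b','>'] ++ PySem.List.slice t (some idx) (some (idx + ql.length)) ++ ['<','/','b','>']])
        (by omega) hjq
      rw [hjcast] at hrec ⊢
      rw [hstep]  -- normalize the recursive start index
      rw [hrec]
      have hskip := hmScanB_skip t ql hq (j - start) start j hsj rfl hpre hmin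
      rw [hskip]
      have hc : (j : Int) + (ql.length : Nat) = ((j + ql.length : Nat) : Int) := by push_cast; ring
      rw [hc, PySem.List.slice_natCast, PySem.List.slice_natCast]
      simp

lemma lower_ne_nil (q : List Char) (h : q ≠ []) : PySem.Chars.lower q ≠ [] := by
  simp [PySem.Chars.lower]
  exact h

theorem highlight_match_spec' : ∀ (text query : String),
    highlight_match text query = highlight_match_alt text query := by
  intro text query
  simp only [highlight_match, highlight_match_alt]
  by_cases hg : query.toList = [] ∨ text.toList = []
  · rw [if_pos hg, if_pos hg]
  · push Not at hg
    obtain ⟨hqne, htne⟩ := hg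
    have hq : PySem.Chars.lower query.toList ≠ [] := lower_ne_nil _ hqne
    rw [if_neg (show ¬(query.toList = [] ∨ text.toList = []) from by tauto)]
    rw [if_neg (show ¬(query.toList = [] ∨ text.toList = []) from by tauto)]
    by_cases hin : PySem.Chars.isIn (PySem.Chars.lower query.toList)
        (PySem.Chars.lower text.toList) = false
    · rw [if_pos hin]
      have hno : ¬ PySem.Chars.lower query.toList <:+: PySem.Chars.lower text.toList :=
        (PySem.Chars.isIn_eq_false_iff _ _).mp hin
      rw [hmScanB_no_match _ _ hno]
      simp
    · rw [if_neg hin]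
      have hql : query.toList.length = (PySem.Chars.lower query.toList).length :=
        (lower_length query.toList).symm
      rw [hql]
      rw [hmLoopA_eq text.toList (PySem.Chars.lower query.toList) hq
        (text.toList.length + 1) 0 [] (by omega) (by omega)]
      simp

-- ===== VERDICT (by name: the statement is the Claim_ definition above) =====
theorem highlight_match_spec : Claim_equal_highlight_match := by
  intro text query _
  unfold Spec_highlight_match
  exact highlight_match_spec' text query
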